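-- pv_equiv track=rewrite | github.com/lihah111222333-cloud/multi-agent-orchestration | dashboard.py | _summarize_agent_status
-- ===== SOURCE A (Python) =====
-- from typing import Any, Optional
--
-- _AGENT_STATUS_NAMES = ("running", "idle", "stuck", "error", "disconnected", "unknown")
--
-- def _empty_agent_status_summary() -> dict[str, int]:
--     return {
--         "total": 0,
--         "healthy": 0,
--         "unhealthy": 0,
--         **{name: 0 for name in _AGENT_STATUS_NAMES},
--     }
--
-- def _summarize_agent_status(agents: list[dict[str, Any]]) -> dict[str, int]:
--     summary = _empty_agent_status_summary()
--     for agent in agents: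
--         status = str(agent.get("status", "unknown")).strip().lower()
--         if status not in _AGENT_STATUS_NAMES:
--             status = "unknown"
--         summary[status] += 1
--         summary["total"] += 1
--
--     summary["healthy"] = summary["running"] + summary["idle"]
--     summary["unhealthy"] = summary["total"] - summary["healthy"]
--     return summary
-- ===== SOURCE B (Python) =====
-- _AGENT_STATUS_NAMES = ("running", "idle", "stuck", "error", "disconnected", "unknown")
--
-- def _normalize(agent):
--     s = str(agent.get("status", "unknown")).strip().lower()
--     return s if s in _AGENT_STATUS_NAMES else "unknown"
--
-- def _summarize_agent_status(agents):
--     counts = {name: sum(1 for a in agents if _normalize(a) == name)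
--               for name in _AGENT_STATUS_NAMES}
--     total = len(agents)
--     healthy = counts["running"] + counts["idle"]
--     return {"total": total, "healthy": healthy, "unhealthy": total - healthy, **counts}
-- ===== Notes on version B (the rewrite author's own statement) =====
-- stated objective: alternative
-- what changed: Replaces the single pass that increments a mutable summary dict in place with per-status-name counting passes (counts built by a dict comprehension over the fixed name tuple) plus total = len(agents) and derived healthy/unhealthy, assembling the result dict in one expression.
import Mathlib
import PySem

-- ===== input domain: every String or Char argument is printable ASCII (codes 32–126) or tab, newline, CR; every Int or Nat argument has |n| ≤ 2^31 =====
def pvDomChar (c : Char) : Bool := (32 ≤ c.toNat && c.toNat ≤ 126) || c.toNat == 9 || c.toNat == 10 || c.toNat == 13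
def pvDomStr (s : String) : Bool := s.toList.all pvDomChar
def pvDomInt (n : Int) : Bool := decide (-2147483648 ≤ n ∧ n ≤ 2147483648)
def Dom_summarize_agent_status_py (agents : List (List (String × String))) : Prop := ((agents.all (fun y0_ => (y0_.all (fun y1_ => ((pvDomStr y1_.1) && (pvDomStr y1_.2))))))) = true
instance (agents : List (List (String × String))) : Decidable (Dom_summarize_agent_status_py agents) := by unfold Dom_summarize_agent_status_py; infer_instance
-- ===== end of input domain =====

-- B replaces A's single in-place counter-increment pass with per-name counting passes and derived totals; objective: alternative decomposition (same O(n) cost).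

-- ===== PORT A =====
def pvStatusNames : List String :=
  ["running", "idle", "stuck", "error", "disconnected", "unknown"]

-- status = str(agent.get("status", "unknown")).strip().lower(); if status not in names: status = "unknown"
def pyNormStatus (agent : List (String × String)) : String :=
  let status := PySem.Str.lower (PySem.Str.strip ((PySem.Dict.mk agent).getD "status" "unknown"))
  if status ∈ pvStatusNames then status else "unknown"

def summarize_agent_status_py (agents : List (List (String × String))) : List (String × Int) :=
  let init : PySem.Dict String Int :=
    PySem.Dict.ofList [("total", 0), ("healthy", 0), ("unhealthy", 0),
      ("running", 0), ("idle", 0), ("stuck", 0), ("error", 0), ("disconnected", 0), ("unknown", 0)]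
  -- summary[status] += 1; summary["total"] += 1  (both keys always present, so modify with default 0 is exact)
  let summary := agents.foldl (fun d agent =>
      let status := pyNormStatus agent
      let d := d.modify status 0 (· + 1)
      d.modify "total" 0 (· + 1)) init
  let summary := summary.insert "healthy" (summary.getD "running" 0 + summary.getD "idle" 0)
  let summary := summary.insert "unhealthy" (summary.getD "total" 0 - summary.getD "healthy" 0)
  summary.items

-- ===== PORT B =====
def altNormStatus (agent : List (String × String)) : String :=
  let s := PySem.Str.lower (PySem.Str.strip ((PySem.Dict.mk agent).getD "status" "unknown"))
  if s ∈ pvStatusNames then s else "unknown"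

def summarize_agent_status_py_alt (agents : List (List (String × String))) : List (String × Int) :=
  let count : String → Int := fun name => (agents.countP (fun a => altNormStatus a == name) : Int)
  let total : Int := agents.length
  let healthy : Int := count "running" + count "idle"
  ("total", total) :: ("healthy", healthy) :: ("unhealthy", total - healthy) ::
    pvStatusNames.map (fun n => (n, count n))

-- ===== PRECONDITION & SPEC =====
def Spec_summarize_agent_status_py (agents : List (List (String × String))) (out : List (String × Int)) : Prop := out = summarize_agent_status_py_alt agents
instance (agents : List (List (String × String))) (out : List (String × Int)) : Decidable (Spec_summarize_agent_status_py agents out) := by unfold Spec_summarize_agent_status_py; infer_instance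

-- ===== CLAIM (what is proved, stated in full; the proofs are below) =====
def Claim_equal_summarize_agent_status_py : Prop := ∀ (agents : List (List (String × String))), Dom_summarize_agent_status_py agents → Spec_summarize_agent_status_py agents (summarize_agent_status_py agents)

-- ===== LEMMAS AND PROOFS =====

-- the loop state of port A, with all nine slots as parameters
def pvMkD (t h u r i s e d k : Int) : PySem.Dict String Int :=
  PySem.Dict.mk [("total", t), ("healthy", h), ("unhealthy", u),
    ("running", r), ("idle", i), ("stuck", s), ("error", e), ("disconnected", d), ("unknown", k)]

def pvStep (d : PySem.Dict String Int) (agent : List (String × String)) : PySem.Dict String Int :=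
  let status := pyNormStatus agent
  let d := d.modify status 0 (· + 1)
  d.modify "total" 0 (· + 1)

lemma pyNormStatus_mem (agent : List (String × String)) : pyNormStatus agent ∈ pvStatusNames := by
  show (if PySem.Str.lower (PySem.Str.strip ((PySem.Dict.mk agent).getD "status" "unknown")) ∈ pvStatusNames
        then PySem.Str.lower (PySem.Str.strip ((PySem.Dict.mk agent).getD "status" "unknown"))
        else "unknown") ∈ pvStatusNames
  split
  · assumption
  · decide

lemma pvStep_eq (t h u r i s e dc k : Int) (agent : List (String × String)) :
    pvStep (pvMkD t h u r i s e dc k) agent =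
      pvMkD (t + 1) h u (r + if pyNormStatus agent = "running" then 1 else 0)
        (i + if pyNormStatus agent = "idle" then 1 else 0)
        (s + if pyNormStatus agent = "stuck" then 1 else 0)
        (e + if pyNormStatus agent = "error" then 1 else 0)
        (dc + if pyNormStatus agent = "disconnected" then 1 else 0)
        (k + if pyNormStatus agent = "unknown" then 1 else 0) := by
  have hmem := pyNormStatus_mem agent
  simp only [pvStatusNames, List.mem_cons, List.not_mem_nil, or_false] at hmem
  unfold pvStep
  rcases hmem with h|h|h|h|h|h <;> rw [h] <;>
    simp [pvMkD, PySem.Dict.modify, PySem.Dict.contains, PySem.Dict.insert,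
      PySem.Dict.getD, PySem.Dict.get?]

lemma pvFold_eq (agents : List (List (String × String))) (t h u r i s e dc k : Int) :
    agents.foldl pvStep (pvMkD t h u r i s e dc k) =
      pvMkD (t + agents.length) h u
        (r + (agents.countP (fun a => pyNormStatus a == "running") : Int))
        (i + (agents.countP (fun a => pyNormStatus a == "idle") : Int))
        (s + (agents.countP (fun a => pyNormStatus a == "stuck") : Int))
        (e + (agents.countP (fun a => pyNormStatus a == "error") : Int))
        (dc + (agents.countP (fun a => pyNormStatus a == "disconnected") : Int))
        (k + (agents.countP (fun a => pyNormStatus a == "unknown") : Int)) := by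
  induction agents generalizing t h u r i s e dc k with
  | nil => simp
  | cons a rest ih =>
    rw [List.foldl_cons, pvStep_eq, ih]
    unfold pvMkD
    simp only [PySem.Dict.mk.injEq, List.cons.injEq, Prod.mk.injEq, List.countP_cons,
      beq_iff_eq, true_and, and_true]
    refine ⟨?_, ?_, ?_, ?_, ?_, ?_, ?_⟩
    · simp only [List.length_cons]
      push_cast
      omega
    all_goals split_ifs <;> push_cast <;> omega

theorem summarize_agent_status_py_eq (agents : List (List (String × String))) :
    summarize_agent_status_py agents = summarize_agent_status_py_alt agents := by
  have h1 : summarize_agent_status_py agents =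
      (let summary := agents.foldl pvStep (pvMkD 0 0 0 0 0 0 0 0 0)
       let summary := summary.insert "healthy" (summary.getD "running" 0 + summary.getD "idle" 0)
       let summary := summary.insert "unhealthy" (summary.getD "total" 0 - summary.getD "healthy" 0)
       summary.items) := rfl
  rw [h1, pvFold_eq]
  show _ = summarize_agent_status_py_alt agents
  unfold summarize_agent_status_py_alt
  have hn : altNormStatus = pyNormStatus := rfl
  simp [hn, pvMkD, PySem.Dict.insert, PySem.Dict.contains, PySem.Dict.getD,
    PySem.Dict.get?, pvStatusNames]

-- ===== VERDICT (by name: the statement is the Claim_ definition above) =====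
theorem summarize_agent_status_py_spec : Claim_equal_summarize_agent_status_py := by
  intro agents _
  exact summarize_agent_status_py_eq agents
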